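-- pv_equiv track=rewrite | github.com/duykienvp/searchableencryption | searchableencryption/hve/hierarchicalencoding.py | encode_cell_id
-- ===== SOURCE A (Python) =====
-- def encode_cell_id(dim: int, row: int, col: int) -> list:
--     """ Get hierarchical encoding binary representation of cell (row, col) with the grid of dim x dim.
--     See Section 3.2 in `https://dl.acm.org/citation.cfm?id=2557559`
--
--     :param int dim: dimension of the grid
--     :param int row: row index
--     :param int col: col index
--
--     :returns: a list of binary representation
--     """
--     rep = []
--     mid = int(dim / 2)
--
--     if col < mid:
--         rep.append(0)
--     else:
--         rep.append(1)
--         col -= mid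
--
--     if row < mid:
--         rep.append(0)
--     else:
--         rep.append(1)
--         row -= mid
--
--     if 1 < mid:
--         rep.extend(encode_cell_id(mid, row, col))
--
--     return rep
-- ===== SOURCE B (Python) =====
-- def encode_cell_id(dim: int, row: int, col: int) -> list:
--     """Iterative re-implementation: explicit loop instead of recursion."""
--     rep = []
--     while True:
--         mid = int(dim / 2)
--         if col < mid:
--             rep.append(0)
--         else:
--             rep.append(1)
--             col -= mid
--         if row < mid:
--             rep.append(0)
--         else:
--             rep.append(1)
--             row -= mid
--         if 1 < mid:
--             dim = mid
--         else:
--             break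
--     return rep
-- ===== Notes on version B (the rewrite author's own statement) =====
-- stated objective: alternative
-- what changed: Replaced the tail recursion with an explicit while-loop maintaining mutable dim/row/col and one accumulator list, appending each level's two bits in place instead of concatenating recursive results.
import Mathlib
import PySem

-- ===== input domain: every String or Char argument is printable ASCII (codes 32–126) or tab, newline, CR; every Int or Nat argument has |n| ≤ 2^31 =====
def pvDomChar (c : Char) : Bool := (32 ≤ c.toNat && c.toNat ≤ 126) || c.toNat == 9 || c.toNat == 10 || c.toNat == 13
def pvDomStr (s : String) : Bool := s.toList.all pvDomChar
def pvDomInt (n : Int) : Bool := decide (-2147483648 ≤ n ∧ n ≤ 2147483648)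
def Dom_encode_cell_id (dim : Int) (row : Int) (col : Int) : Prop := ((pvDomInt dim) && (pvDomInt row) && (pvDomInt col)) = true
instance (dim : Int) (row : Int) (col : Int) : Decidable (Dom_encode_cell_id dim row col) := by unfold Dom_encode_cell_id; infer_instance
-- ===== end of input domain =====

-- B rewrites A's recursion as an explicit loop with an accumulator (same values, different decomposition).
-- Termination helper cited by both ports' decreasing_by.
theorem pv_mid_lt (dim : Int) (h : 1 < dim.tdiv 2) : (dim.tdiv 2).natAbs < dim.natAbs := by
  have h1 : (dim.tdiv 2).natAbs = dim.natAbs / 2 := Int.natAbs_tdiv dim 2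
  omega

-- ===== PORT A =====
-- int(dim / 2) truncates toward zero: exact as Int.tdiv for |dim| ≤ 2^31 (< 2^53, float-exact).
def encode_cell_id (dim : Int) (row : Int) (col : Int) : List Int :=
  let mid := dim.tdiv 2
  let (b0, col') := if col < mid then ((0 : Int), col) else ((1 : Int), col - mid)
  let (b1, row') := if row < mid then ((0 : Int), row) else ((1 : Int), row - mid)
  if h : 1 < mid then
    [b0, b1] ++ encode_cell_id mid row' col'
  else
    [b0, b1]
termination_by dim.natAbs
decreasing_by exact pv_mid_lt dim h

-- ===== PORT B =====
-- the while-loop body of Source B: state (dim, row, col, rep), rep grows at the tail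
def encode_loop (dim : Int) (row : Int) (col : Int) (rep : List Int) : List Int :=
  let mid := dim.tdiv 2
  let (rep₁, col') := if col < mid then (rep ++ [(0 : Int)], col) else (rep ++ [(1 : Int)], col - mid)
  let (rep₂, row') := if row < mid then (rep₁ ++ [(0 : Int)], row) else (rep₁ ++ [(1 : Int)], row - mid)
  if h : 1 < mid then
    encode_loop mid row' col' rep₂
  else
    rep₂
termination_by dim.natAbs
decreasing_by exact pv_mid_lt dim h

def encode_cell_id_alt (dim : Int) (row : Int) (col : Int) : List Int :=
  encode_loop dim row col []

-- ===== PRECONDITION & SPEC =====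
def Spec_encode_cell_id (dim : Int) (row : Int) (col : Int) (out : List Int) : Prop := out = encode_cell_id_alt dim row col
instance (dim : Int) (row : Int) (col : Int) (out : List Int) : Decidable (Spec_encode_cell_id dim row col out) := by unfold Spec_encode_cell_id; infer_instance

-- ===== CLAIM (what is proved, stated in full; the proofs are below) =====
def Claim_equal_encode_cell_id : Prop := ∀ (dim : Int) (row : Int) (col : Int), Dom_encode_cell_id dim row col → Spec_encode_cell_id dim row col (encode_cell_id dim row col)

-- ===== LEMMAS AND PROOFS =====
theorem encode_loop_eq (dim row col : Int) (rep : List Int) :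
    encode_loop dim row col rep = rep ++ encode_cell_id dim row col := by
  fun_induction encode_loop dim row col rep with
  | case1 dim row col rep mid rep₁ col' hc rep₂ row' hr h ih =>
    rw [ih]; conv_rhs => rw [encode_cell_id]
    split at hc <;> split at hr <;>
      (injection hc with e1 e2; injection hr with e3 e4;
       subst e1; subst e2; subst e3; subst e4; simp only [mid] at *; simp [*])
  | case2 dim row col rep mid rep₁ col' hc rep₂ row' hr h =>
    conv_rhs => rw [encode_cell_id]
    split at hc <;> split at hr <;>
      (injection hc with e1 e2; injection hr with e3 e4;
       subst e1; subst e2; subst e3; subst e4; simp only [mid] at *; simp [*])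

-- ===== VERDICT (by name: the statement is the Claim_ definition above) =====
theorem encode_cell_id_spec : Claim_equal_encode_cell_id := by
  intro dim row col _
  unfold Spec_encode_cell_id encode_cell_id_alt
  rw [encode_loop_eq]
  simp
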